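-- pv_equiv track=rewrite | github.com/OSUrobotics/me499 | functions/yielding.py | odd_numbers_generator
-- ===== SOURCE A (Python) =====
-- def odd_numbers_generator(start, stop):
--     """
--     A generator function that returns all of the odd numbers in a given range.
--
--     :param start: The start of the range.
--     :param stop: The end of the range.
--     :return: The odd numbers in the range.
--     """
--
--     # Find the first odd number.  If the starting number is even, the first odd number is that number plus one.
--     if start % 2 == 0:
--         i = start + 1
--     else:
--         i = start
--
--     # Loop until we get to the end point.
--     while i <= stop:
--         # Yield the current number.
--         yield i
--
--         # The next odd number is two more than the last one.
--         i += 2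
-- ===== SOURCE B (Python) =====
-- def odd_numbers_generator(start, stop):
--     """Yield the odd numbers in [start, stop] by filtering the full closed range."""
--     for i in range(start, stop + 1):
--         if i % 2 != 0:
--             yield i
-- ===== Notes on version B (the rewrite author's own statement) =====
-- stated objective: simpler
-- what changed: B iterates over the whole closed range and filters by the parity test instead of computing the first odd value and stepping by two.
import Mathlib
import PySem

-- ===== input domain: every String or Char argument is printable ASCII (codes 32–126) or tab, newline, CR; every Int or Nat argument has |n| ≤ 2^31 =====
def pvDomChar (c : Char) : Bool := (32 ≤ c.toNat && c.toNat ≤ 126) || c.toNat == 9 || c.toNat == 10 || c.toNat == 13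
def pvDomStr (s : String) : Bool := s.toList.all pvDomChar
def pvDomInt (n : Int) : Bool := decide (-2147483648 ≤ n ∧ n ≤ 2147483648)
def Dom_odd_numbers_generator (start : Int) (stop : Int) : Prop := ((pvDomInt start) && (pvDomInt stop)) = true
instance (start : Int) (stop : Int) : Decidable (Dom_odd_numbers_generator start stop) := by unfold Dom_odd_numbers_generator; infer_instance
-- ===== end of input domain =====

-- B filters the whole closed range by the parity test instead of computing the first odd value and stepping by two (objective: simpler).

-- ===== PORT A =====
-- while i <= stop: yield i; i += 2
def pvALoop (i stop : Int) : List Int :=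
  if i ≤ stop then i :: pvALoop (i + 2) stop else []
termination_by (stop + 1 - i).toNat
decreasing_by omega

def odd_numbers_generator (start : Int) (stop : Int) : List Int :=
  let i := if PySem.Int.mod start 2 == 0 then start + 1 else start
  pvALoop i stop

-- ===== PORT B =====
-- for i in range(start, stop + 1): if i % 2 != 0: yield i
def odd_numbers_generator_alt (start : Int) (stop : Int) : List Int :=
  (PySem.List.pyRange start (stop + 1) 1).filter (fun i => PySem.Int.mod i 2 != 0)

-- ===== PRECONDITION & SPEC =====
def Spec_odd_numbers_generator (start : Int) (stop : Int) (out : List Int) : Prop := out = odd_numbers_generator_alt start stop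
instance (start : Int) (stop : Int) (out : List Int) : Decidable (Spec_odd_numbers_generator start stop out) := by unfold Spec_odd_numbers_generator; infer_instance

-- ===== CLAIM (what is proved, stated in full; the proofs are below) =====
def Claim_equal_odd_numbers_generator : Prop := ∀ (start : Int) (stop : Int), Dom_odd_numbers_generator start stop → Spec_odd_numbers_generator start stop (odd_numbers_generator start stop)

-- ===== LEMMAS AND PROOFS =====

-- On an odd lower bound i, A's step-by-two loop equals B's filtered range from i.
lemma pvALoop_eq_filter (stop : Int) :
    ∀ (n : Nat) (i : Int), (stop + 1 - i).toNat = n → PySem.Int.mod i 2 = 1 →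
      pvALoop i stop = (PySem.List.pyRange i (stop + 1) 1).filter (fun j => PySem.Int.mod j 2 != 0) := by
  intro n
  induction n using Nat.strong_induction_on with
  | _ n ih =>
    intro i hn hodd
    rw [pvALoop]
    by_cases h : i ≤ stop
    · have hlt : i < stop + 1 := by omega
      rw [PySem.List.pyRange_one_cons hlt, List.filter_cons]
      simp only [hodd]
      have hnext : PySem.Int.mod (i + 1) 2 = 0 := by
        have := PySem.Int.mod_eq_emod_of_pos (a := i) (b := 2) (by norm_num)
        have := PySem.Int.mod_eq_emod_of_pos (a := i + 1) (b := 2) (by norm_num)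
        omega
      by_cases h2 : i + 1 ≤ stop
      · have hlt2 : i + 1 < stop + 1 := by omega
        rw [PySem.List.pyRange_one_cons hlt2, List.filter_cons]
        simp only [hnext]
        have hodd2 : PySem.Int.mod (i + 2) 2 = 1 := by
          have := PySem.Int.mod_eq_emod_of_pos (a := i) (b := 2) (by norm_num)
          have := PySem.Int.mod_eq_emod_of_pos (a := i + 2) (b := 2) (by norm_num)
          omega
        rw [if_pos h, ih (stop + 1 - (i + 2)).toNat (by omega) (i + 2) rfl hodd2,
          show i + 1 + 1 = i + 2 from by ring]
        simp
      · rw [if_pos h, pvALoop]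
        have hend : PySem.List.pyRange (i + 1) (stop + 1) 1 = [] := by
          simp [PySem.List.pyRange]; omega
        rw [hend]
        simp; omega
    · have hend : PySem.List.pyRange i (stop + 1) 1 = [] := by
        simp [PySem.List.pyRange]; omega
      rw [hend, if_neg h]
      simp

-- ===== VERDICT (by name: the statement is the Claim_ definition above) =====
theorem odd_numbers_generator_spec : Claim_equal_odd_numbers_generator := by
  intro start stop _
  unfold Spec_odd_numbers_generator odd_numbers_generator odd_numbers_generator_alt
  have hmod := PySem.Int.mod_two_eq start
  have hemod := PySem.Int.mod_eq_emod_of_pos (a := start) (b := 2) (by norm_num)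
  by_cases h0 : PySem.Int.mod start 2 = 0
  · simp only [h0]
    have hodd : PySem.Int.mod (start + 1) 2 = 1 := by
      have := PySem.Int.mod_eq_emod_of_pos (a := start + 1) (b := 2) (by norm_num)
      omega
    simp only [beq_self_eq_true, if_true]
    rw [pvALoop_eq_filter stop (stop + 1 - (start + 1)).toNat (start + 1) rfl hodd]
    by_cases h : start < stop + 1
    · rw [PySem.List.pyRange_one_cons h, List.filter_cons]
      simp
      omega
    · have h1 : PySem.List.pyRange start (stop + 1) 1 = [] := by
        simp [PySem.List.pyRange]; omega
      have h2 : PySem.List.pyRange (start + 1) (stop + 1) 1 = [] := by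
        simp [PySem.List.pyRange]; omega
      rw [h1, h2]
  · have h1 : PySem.Int.mod start 2 = 1 := by omega
    simp only [h1]
    show pvALoop start stop = _
    exact pvALoop_eq_filter stop (stop + 1 - start).toNat start rfl h1
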